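-- pv_equiv track=rewrite | github.com/ubarotov/Fundamentals-of-Programming | Lab4/lab.py | all_coordinates_in_array
-- ===== SOURCE A (Python) =====
-- def all_coordinates_in_array(dim):
--     """
--     given dimension of an array, returns a list containing all of the coordinates in the array.
--
--     Parameters
--     ----------
--     dim : tuple
--         tuple representing dimensions of an array
--
--     Returns
--     -------
--     list conatining all of the coordinates in the array
--
--     >>> all_coordinates_in_array((9,))
--     [(0,), (1,), (2,), (3,), (4,), (5,), (6,), (7,), (8,)]
--
--     >>> all_coordinates_in_array((2,2))
--     [(0, 0), (0, 1), (1, 0), (1, 1)]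
--
--     """
--     if len(dim) == 1:
--         return [(i,) for i in range(dim[0])]
--
--     else:
--         coordinates_list = []
--         for i in range(dim[0]):
--             for j in all_coordinates_in_array(dim[1:]):
--                 coordinates_list.append((i,) + j)
--         return coordinates_list
-- ===== SOURCE B (Python) =====
-- def all_coordinates_in_array(dim):
--     result = [(i,) for i in range(dim[0])]
--     for d in dim[1:]:
--         result = [r + (i,) for r in result for i in range(d)]
--     return result
-- ===== Notes on version B (the rewrite author's own statement) =====
-- stated objective: alternative
-- what changed: Replaces A's recursion (which recomputes the full suffix product inside every iteration of the outer loop) with an iterative breadth-first Cartesian-product build that extends each partial coordinate on the right, one dimension per pass.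
-- outside the precondition, e.g. on all_coordinates_in_array(()): A raises IndexError, B raises IndexError
import Mathlib
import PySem

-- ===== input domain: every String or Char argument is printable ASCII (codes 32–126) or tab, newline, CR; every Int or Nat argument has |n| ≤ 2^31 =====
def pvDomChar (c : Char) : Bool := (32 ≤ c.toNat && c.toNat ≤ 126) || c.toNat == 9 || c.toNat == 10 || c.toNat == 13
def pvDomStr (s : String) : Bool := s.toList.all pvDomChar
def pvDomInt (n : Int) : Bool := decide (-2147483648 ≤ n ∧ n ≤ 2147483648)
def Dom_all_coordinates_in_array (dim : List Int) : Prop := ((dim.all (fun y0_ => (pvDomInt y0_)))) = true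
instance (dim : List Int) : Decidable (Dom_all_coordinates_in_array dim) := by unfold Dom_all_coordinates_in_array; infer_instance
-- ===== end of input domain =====

-- B replaces A's recursion with an iterative breadth-first Cartesian-product build (same cost, different decomposition).


-- ===== PORT A =====
-- literal port of A: base case a comprehension over range(dim[0]); else an append loop
-- over range(dim[0]) with an inner append loop over the recursive call on dim[1:].
-- (dim = [] raises IndexError in Python; excluded by Pre_; the [] branch value is irrelevant.)
def all_coordinates_in_array (dim : List Int) : List (List Int) :=
  match dim with
  | [] => []
  | [d] => (PySem.List.pyRange 0 d 1).map (fun i => [i])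
  | d :: rest =>
      (PySem.List.pyRange 0 d 1).foldl
        (fun acc i =>
          (all_coordinates_in_array rest).foldl (fun acc2 j => acc2 ++ [i :: j]) acc)
        []

-- ===== PORT B =====
-- literal port of B: seed [(i,) for i in range(dim[0])], then for d in dim[1:]
-- rebuild result as [r + (i,) for r in result for i in range(d)].
def all_coordinates_in_array_alt (dim : List Int) : List (List Int) :=
  match dim with
  | [] => []
  | d :: rest =>
      rest.foldl
        (fun res d' => res.flatMap (fun r => (PySem.List.pyRange 0 d' 1).map (fun i => r ++ [i])))
        ((PySem.List.pyRange 0 d 1).map (fun i => [i]))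

-- ===== PRECONDITION & SPEC =====
-- Pre_ excludes only dim = [] (empty tuple), on which Python A raises IndexError at its first subscript.
def Pre_all_coordinates_in_array (dim : List Int) : Prop := dim ≠ []
instance (dim : List Int) : Decidable (Pre_all_coordinates_in_array dim) := by unfold Pre_all_coordinates_in_array; infer_instance
def pvWitness_all_coordinates_in_array : List Int := ([2, 3])

def Spec_all_coordinates_in_array (dim : List Int) (out : List (List Int)) : Prop := out = all_coordinates_in_array_alt dim
instance (dim : List Int) (out : List (List Int)) : Decidable (Spec_all_coordinates_in_array dim out) := by unfold Spec_all_coordinates_in_array; infer_instance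

-- ===== CLAIM (what is proved, stated in full; the proofs are below) =====
def Claim_equal_all_coordinates_in_array : Prop := ∀ (dim : List Int), Dom_all_coordinates_in_array dim → Pre_all_coordinates_in_array dim → Spec_all_coordinates_in_array dim (all_coordinates_in_array dim)

-- ===== LEMMAS AND PROOFS =====

-- clean mathematical Cartesian product, used only by the proofs
def coordProd : List Int → List (List Int)
  | [] => [[]]
  | d :: rest => (PySem.List.pyRange 0 d 1).flatMap (fun i => (coordProd rest).map (fun j => i :: j))

lemma coordProd_snoc (p : List Int) (d : Int) :
    coordProd (p ++ [d]) = (coordProd p).flatMap (fun r => (PySem.List.pyRange 0 d 1).map (fun i => r ++ [i])) := by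
  induction p with
  | nil => simp [coordProd, ← List.map_eq_flatMap]
  | cons x p ih =>
      simp [coordProd, ih, List.map_flatMap, List.flatMap_map, List.flatMap_assoc,
        List.map_map, Function.comp_def]

lemma A_eq_coordProd : ∀ dim : List Int, dim ≠ [] → all_coordinates_in_array dim = coordProd dim := by
  intro dim
  induction dim with
  | nil => intro h; exact absurd rfl h
  | cons d rest ih =>
      intro _
      cases rest with
      | nil => simp [all_coordinates_in_array, coordProd, ← List.map_eq_flatMap]
      | cons e rest' =>
          have hr := ih (by simp)
          simp only [all_coordinates_in_array, hr,
            PySem.List.foldl_append_eq_flatMap, ← List.map_eq_flatMap, List.nil_append]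
          simp [coordProd]

lemma B_fold_eq (rest : List Int) : ∀ p : List Int,
    rest.foldl
      (fun res d' => res.flatMap (fun r => (PySem.List.pyRange 0 d' 1).map (fun i => r ++ [i])))
      (coordProd p) = coordProd (p ++ rest) := by
  induction rest with
  | nil => intro p; simp
  | cons d rest ih =>
      intro p
      simp only [List.foldl_cons, ← coordProd_snoc, ih (p ++ [d]), List.append_assoc,
        List.singleton_append]

-- ===== VERDICT (by name: the statement is the Claim_ definition above) =====
theorem all_coordinates_in_array_spec : Claim_equal_all_coordinates_in_array := by
  intro dim _ hpre
  unfold Spec_all_coordinates_in_array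
  cases dim with
  | nil => exact absurd rfl hpre
  | cons d rest =>
      rw [A_eq_coordProd _ (by simp)]
      show coordProd (d :: rest) = all_coordinates_in_array_alt (d :: rest)
      have hseed : (PySem.List.pyRange 0 d 1).map (fun i => [i]) = coordProd [d] := by
        simp [coordProd, ← List.map_eq_flatMap]
      simp only [all_coordinates_in_array_alt, hseed, B_fold_eq rest [d], List.singleton_append]
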